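-- pv_equiv track=rewrite | github.com/cbeach/game_analysis_scratch_pad | sprite_sheet_tools.py | calc_bounding_boxes
-- ===== SOURCE A (Python) =====
-- def calc_bounding_boxes(sprites):
--     bounding_box = lambda x1, y1, x2, y2: {'x1': x1, 'y1': y1, 'x2': x2, 'y2': y2}
--     boxes = []
--     x = lambda c: c[0]
--     y = lambda c: c[1]
--     for s in sprites:
--         coords = [p[0] for p in s]
--         boxes.append(bounding_box(min(coords, key=x)[0], min(coords, key=y)[1],
--                                   max(coords, key=x)[0], max(coords, key=y)[1]))
--     return boxes
-- ===== SOURCE B (Python) =====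
-- def calc_bounding_boxes(sprites):
--     boxes = []
--     for s in sprites:
--         x1, y1 = s[0][0]
--         x2, y2 = x1, y1
--         for p in s[1:]:
--             cx, cy = p[0]
--             if cx < x1: x1 = cx
--             if cy < y1: y1 = cy
--             if cx > x2: x2 = cx
--             if cy > y2: y2 = cy
--         boxes.append({'x1': x1, 'y1': y1, 'x2': x2, 'y2': y2})
--     return boxes
-- ===== Notes on version B (the rewrite author's own statement) =====
-- stated objective: alternative
-- what changed: A builds the coordinate list and makes four separate keyed min()/max() scans per sprite; B makes a single pass per sprite maintaining the running (x1, y1, x2, y2) bounds seeded from the first point.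
import Mathlib
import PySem

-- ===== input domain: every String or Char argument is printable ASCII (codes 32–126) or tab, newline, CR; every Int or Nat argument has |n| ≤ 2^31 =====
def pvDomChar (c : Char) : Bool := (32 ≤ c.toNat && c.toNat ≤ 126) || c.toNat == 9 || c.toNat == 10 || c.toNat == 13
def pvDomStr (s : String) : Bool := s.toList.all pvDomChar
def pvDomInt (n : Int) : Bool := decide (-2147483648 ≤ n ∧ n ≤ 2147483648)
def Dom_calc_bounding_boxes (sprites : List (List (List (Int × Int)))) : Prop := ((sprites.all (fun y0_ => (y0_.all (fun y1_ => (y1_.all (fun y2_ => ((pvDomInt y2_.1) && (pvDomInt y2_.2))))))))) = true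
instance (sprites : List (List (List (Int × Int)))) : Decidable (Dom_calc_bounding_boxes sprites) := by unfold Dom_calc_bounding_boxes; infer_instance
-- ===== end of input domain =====

-- B replaces A's four keyed min/max scans per sprite by a single one-pass fold
-- maintaining (x1, y1, x2, y2); same return value on every sprite list whose
-- sprites and points are nonempty (elsewhere both Pythons raise).

-- ===== PORT A =====
-- A: for each sprite, coords = [p[0] for p in s]; box from the four keyed extrema.
def calc_bounding_boxes (sprites : List (List (List (Int × Int)))) : List (List (String × Int)) :=
  sprites.foldl (fun boxes s =>
    let coords := s.map (fun p => PySem.List.pyGetD p 0 (0, 0))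
    boxes ++ [[("x1", ((PySem.List.min? coords (fun c => c.1)).getD (0, 0)).1),
               ("y1", ((PySem.List.min? coords (fun c => c.2)).getD (0, 0)).2),
               ("x2", ((PySem.List.max? coords (fun c => c.1)).getD (0, 0)).1),
               ("y2", ((PySem.List.max? coords (fun c => c.2)).getD (0, 0)).2)]]) []

-- ===== PORT B =====
-- B: seed the four bounds from s[0][0], then one pass over s[1:] updating them.
def calc_bounding_boxes_alt (sprites : List (List (List (Int × Int)))) : List (List (String × Int)) :=
  sprites.foldl (fun boxes s =>
    let c0 := PySem.List.pyGetD (PySem.List.pyGetD s 0 []) 0 (0, 0)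
    let st := (PySem.List.slice s (some 1) none).foldl
      (fun (st : Int × Int × Int × Int) p =>
        let c := PySem.List.pyGetD p 0 (0, 0)
        (if c.1 < st.1 then c.1 else st.1,
         if c.2 < st.2.1 then c.2 else st.2.1,
         if c.1 > st.2.2.1 then c.1 else st.2.2.1,
         if c.2 > st.2.2.2 then c.2 else st.2.2.2))
      (c0.1, c0.2, c0.1, c0.2)
    boxes ++ [[("x1", st.1), ("y1", st.2.1), ("x2", st.2.2.1), ("y2", st.2.2.2)]]) []

-- ===== PRECONDITION & SPEC =====
-- Pre_ excludes exactly the inputs on which A raises: an empty sprite (min() of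
-- an empty sequence, ValueError) or an empty point list (p[0], IndexError).
def Pre_calc_bounding_boxes (sprites : List (List (List (Int × Int)))) : Prop :=
  ∀ s ∈ sprites, s ≠ [] ∧ ∀ p ∈ s, p ≠ []
instance (sprites : List (List (List (Int × Int)))) : Decidable (Pre_calc_bounding_boxes sprites) := by unfold Pre_calc_bounding_boxes; infer_instance
def pvWitness_calc_bounding_boxes : (List (List (List (Int × Int)))) :=
  [[[(1, 2)], [(0, 5), (9, 9)], [(3, -4)]], [[(7, 7)]]]
def Spec_calc_bounding_boxes (sprites : List (List (List (Int × Int)))) (out : List (List (String × Int))) : Prop := out = calc_bounding_boxes_alt sprites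
instance (sprites : List (List (List (Int × Int)))) (out : List (List (String × Int))) : Decidable (Spec_calc_bounding_boxes sprites out) := by unfold Spec_calc_bounding_boxes; infer_instance

-- ===== CLAIM (what is proved, stated in full; the proofs are below) =====
def Claim_equal_calc_bounding_boxes : Prop := ∀ (sprites : List (List (List (Int × Int)))), Dom_calc_bounding_boxes sprites → Pre_calc_bounding_boxes sprites → Spec_calc_bounding_boxes sprites (calc_bounding_boxes sprites)

-- ===== LEMMAS AND PROOFS =====

theorem pv_foldl_min_mem (a : Int) (l : List Int) : l.foldl min a ∈ a :: l := by
  induction l generalizing a with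
  | nil => simp
  | cons b t ih =>
    rw [List.foldl_cons]
    rcases List.mem_cons.mp (ih (min a b)) with h | h
    · rw [h, min_def]; split_ifs <;> simp
    · simp [h]

theorem pv_foldl_min_le (a : Int) (l : List Int) : ∀ b ∈ a :: l, l.foldl min a ≤ b := by
  induction l generalizing a with
  | nil => simp
  | cons c t ih =>
    intro b hb
    rw [List.foldl_cons]
    have h := ih (min a c)
    rcases List.mem_cons.mp hb with rfl | hb'
    · exact le_trans (h _ (List.mem_cons_self ..)) (min_le_left _ _)
    · rcases List.mem_cons.mp hb' with rfl | hb''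
      · exact le_trans (h _ (List.mem_cons_self ..)) (min_le_right _ _)
      · exact h b (List.mem_cons_of_mem _ hb'')

theorem pv_foldl_max_mem (a : Int) (l : List Int) : l.foldl max a ∈ a :: l := by
  induction l generalizing a with
  | nil => simp
  | cons b t ih =>
    rw [List.foldl_cons]
    rcases List.mem_cons.mp (ih (max a b)) with h | h
    · rw [h, max_def]; split_ifs <;> simp
    · simp [h]

theorem pv_foldl_max_ge (a : Int) (l : List Int) : ∀ b ∈ a :: l, b ≤ l.foldl max a := by
  induction l generalizing a with
  | nil => simp
  | cons c t ih =>
    intro b hb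
    rw [List.foldl_cons]
    have h := ih (max a c)
    rcases List.mem_cons.mp hb with rfl | hb'
    · exact le_trans (le_max_left _ _) (h _ (List.mem_cons_self ..))
    · rcases List.mem_cons.mp hb' with rfl | hb''
      · exact le_trans (le_max_right _ _) (h _ (List.mem_cons_self ..))
      · exact h b (List.mem_cons_of_mem _ hb'')

-- A's keyed min: the key-component of min(xs, key=f) equals the running min of keys.
theorem pv_minKey {α : Type} (f : α → Int) (c : α) (cs : List α) (d : α) :
    f ((PySem.List.min? (c :: cs) f).getD d) = (cs.map f).foldl min (f c) := by
  cases hm : PySem.List.min? (c :: cs) f with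
  | none => exact absurd ((PySem.List.min?_eq_none_iff _ _).mp hm) (by simp)
  | some m =>
    simp only [Option.getD_some]
    have hmem := PySem.List.min?_mem hm
    have hmin := PySem.List.min?_isMin hm
    have h1 : f m ≤ (cs.map f).foldl min (f c) := by
      rcases List.mem_cons.mp (pv_foldl_min_mem (f c) (cs.map f)) with h | h
      · rw [h]; exact hmin c (List.mem_cons_self ..)
      · rcases List.mem_map.mp h with ⟨v, hv, he⟩
        rw [← he]; exact hmin v (List.mem_cons_of_mem _ hv)
    have h2 : (cs.map f).foldl min (f c) ≤ f m := by
      apply pv_foldl_min_le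
      rcases List.mem_cons.mp hmem with h | h
      · simp [h]
      · exact List.mem_cons_of_mem _ (List.mem_map.mpr ⟨m, h, rfl⟩)
    omega

theorem pv_maxKey {α : Type} (f : α → Int) (c : α) (cs : List α) (d : α) :
    f ((PySem.List.max? (c :: cs) f).getD d) = (cs.map f).foldl max (f c) := by
  cases hm : PySem.List.max? (c :: cs) f with
  | none => exact absurd ((PySem.List.max?_eq_none_iff _ _).mp hm) (by simp)
  | some m =>
    simp only [Option.getD_some]
    have hmem := PySem.List.max?_mem hm
    have hmax := PySem.List.max?_isMax hm
    have h1 : (cs.map f).foldl max (f c) ≤ f m := by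
      rcases List.mem_cons.mp (pv_foldl_max_mem (f c) (cs.map f)) with h | h
      · rw [h]; exact hmax c (List.mem_cons_self ..)
      · rcases List.mem_map.mp h with ⟨v, hv, he⟩
        rw [← he]; exact hmax v (List.mem_cons_of_mem _ hv)
    have h2 : f m ≤ (cs.map f).foldl max (f c) := by
      apply pv_foldl_max_ge
      rcases List.mem_cons.mp hmem with h | h
      · simp [h]
      · exact List.mem_cons_of_mem _ (List.mem_map.mpr ⟨m, h, rfl⟩)
    omega

-- specializations of the keyed-extremum lemmas to the two coordinates
theorem pv_min1 (c : Int × Int) (cs : List (Int × Int)) (d : Int × Int) :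
    ((PySem.List.min? (c :: cs) (fun v : Int × Int => v.1)).getD d).1 =
      (cs.map (fun v : Int × Int => v.1)).foldl min c.1 :=
  pv_minKey (fun v => v.1) c cs d
theorem pv_min2 (c : Int × Int) (cs : List (Int × Int)) (d : Int × Int) :
    ((PySem.List.min? (c :: cs) (fun v : Int × Int => v.2)).getD d).2 =
      (cs.map (fun v : Int × Int => v.2)).foldl min c.2 :=
  pv_minKey (fun v => v.2) c cs d
theorem pv_max1 (c : Int × Int) (cs : List (Int × Int)) (d : Int × Int) :
    ((PySem.List.max? (c :: cs) (fun v : Int × Int => v.1)).getD d).1 =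
      (cs.map (fun v : Int × Int => v.1)).foldl max c.1 :=
  pv_maxKey (fun v => v.1) c cs d
theorem pv_max2 (c : Int × Int) (cs : List (Int × Int)) (d : Int × Int) :
    ((PySem.List.max? (c :: cs) (fun v : Int × Int => v.2)).getD d).2 =
      (cs.map (fun v : Int × Int => v.2)).foldl max c.2 :=
  pv_maxKey (fun v => v.2) c cs d

-- B's one-pass quadruple fold over the points equals the four running min/max folds
-- over the projected coordinates.
theorem pv_quad (ps : List (List (Int × Int))) (x1 y1 x2 y2 : Int) :
    ps.foldl (fun (st : Int × Int × Int × Int) p =>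
        (if (PySem.List.pyGetD p 0 ((0 : Int), (0 : Int))).1 < st.1 then (PySem.List.pyGetD p 0 ((0 : Int), (0 : Int))).1 else st.1,
         if (PySem.List.pyGetD p 0 ((0 : Int), (0 : Int))).2 < st.2.1 then (PySem.List.pyGetD p 0 ((0 : Int), (0 : Int))).2 else st.2.1,
         if (PySem.List.pyGetD p 0 ((0 : Int), (0 : Int))).1 > st.2.2.1 then (PySem.List.pyGetD p 0 ((0 : Int), (0 : Int))).1 else st.2.2.1,
         if (PySem.List.pyGetD p 0 ((0 : Int), (0 : Int))).2 > st.2.2.2 then (PySem.List.pyGetD p 0 ((0 : Int), (0 : Int))).2 else st.2.2.2))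
      (x1, y1, x2, y2) =
      (((ps.map (fun p => PySem.List.pyGetD p 0 ((0 : Int), (0 : Int)))).map (fun v : Int × Int => v.1)).foldl min x1,
       ((ps.map (fun p => PySem.List.pyGetD p 0 ((0 : Int), (0 : Int)))).map (fun v : Int × Int => v.2)).foldl min y1,
       ((ps.map (fun p => PySem.List.pyGetD p 0 ((0 : Int), (0 : Int)))).map (fun v : Int × Int => v.1)).foldl max x2,
       ((ps.map (fun p => PySem.List.pyGetD p 0 ((0 : Int), (0 : Int)))).map (fun v : Int × Int => v.2)).foldl max y2) := by
  induction ps generalizing x1 y1 x2 y2 with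
  | nil => rfl
  | cons p t ih =>
    have e1 : (if (PySem.List.pyGetD p 0 ((0 : Int), (0 : Int))).1 < x1 then (PySem.List.pyGetD p 0 ((0 : Int), (0 : Int))).1 else x1) = min x1 (PySem.List.pyGetD p 0 ((0 : Int), (0 : Int))).1 := by
      rw [min_def]; split_ifs <;> omega
    have e2 : (if (PySem.List.pyGetD p 0 ((0 : Int), (0 : Int))).2 < y1 then (PySem.List.pyGetD p 0 ((0 : Int), (0 : Int))).2 else y1) = min y1 (PySem.List.pyGetD p 0 ((0 : Int), (0 : Int))).2 := by
      rw [min_def]; split_ifs <;> omega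
    have e3 : (if (PySem.List.pyGetD p 0 ((0 : Int), (0 : Int))).1 > x2 then (PySem.List.pyGetD p 0 ((0 : Int), (0 : Int))).1 else x2) = max x2 (PySem.List.pyGetD p 0 ((0 : Int), (0 : Int))).1 := by
      rw [max_def]; split_ifs <;> omega
    have e4 : (if (PySem.List.pyGetD p 0 ((0 : Int), (0 : Int))).2 > y2 then (PySem.List.pyGetD p 0 ((0 : Int), (0 : Int))).2 else y2) = max y2 (PySem.List.pyGetD p 0 ((0 : Int), (0 : Int))).2 := by
      rw [max_def]; split_ifs <;> omega
    simp only [List.foldl_cons, List.map_cons, e1, e2, e3, e4, ih]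

-- ===== VERDICT (by name: the statement is the Claim_ definition above) =====
theorem calc_bounding_boxes_spec : Claim_equal_calc_bounding_boxes := by
  intro sprites _ hpre
  unfold Spec_calc_bounding_boxes calc_bounding_boxes calc_bounding_boxes_alt
  apply PySem.List.foldl_congr_mem
  intro acc s hsmem
  obtain ⟨hs, hp⟩ := hpre s hsmem
  obtain ⟨p0, ps, rfl⟩ := List.exists_cons_of_ne_nil hs
  simp only [List.map_cons, PySem.List.pyGetD_zero_cons]
  rw [PySem.List.slice_from _ (by norm_num)]
  simp only [Int.toNat_one, List.drop_succ_cons, List.drop_zero]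
  rw [pv_quad, pv_min1, pv_min2, pv_max1, pv_max2]
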